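-- pv_equiv track=rewrite | github.com/dmakhervaks/medical-contradictions | snomed_dataset/dataset_creation.py | check_if_phrases_are_redundant
-- ===== SOURCE A (Python) =====
-- def check_if_phrases_are_redundant(phrases):
--     phrases_list = list(phrases)
--     new_phrases = []
--     for i in range(len(phrases_list)):
--         is_substring = False
--         p1 = phrases_list[i]
--         for j in range(len(phrases_list)):
--             if i != j:
--                 p2 = phrases_list[j]
--                 if p1 in p2: # currently checking if p1 is substring of anything... if it isn't then we can add it
--                     is_substring=True
--                     break
--         if not is_substring:
--             new_phrases.append(p1)
--
--     return new_phrases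
-- ===== SOURCE B (Python) =====
-- def check_if_phrases_are_redundant(phrases):
--     phrases_list = list(phrases)
--     counts = {}
--     for p in phrases_list:
--         counts[p] = counts.get(p, 0) + 1
--     distinct = list(counts)
--     return [p for p in phrases_list
--             if counts[p] == 1 and not any(p in q for q in distinct if q != p)]
-- ===== Notes on version B (the rewrite author's own statement) =====
-- stated objective: alternative
-- what changed: A's index-pair double loop with a break flag is replaced by a count dictionary built in one pass (duplicates decided by the count) plus a single substring scan over the distinct phrases only, emitted as a filter over the original list.
import Mathlib
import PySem

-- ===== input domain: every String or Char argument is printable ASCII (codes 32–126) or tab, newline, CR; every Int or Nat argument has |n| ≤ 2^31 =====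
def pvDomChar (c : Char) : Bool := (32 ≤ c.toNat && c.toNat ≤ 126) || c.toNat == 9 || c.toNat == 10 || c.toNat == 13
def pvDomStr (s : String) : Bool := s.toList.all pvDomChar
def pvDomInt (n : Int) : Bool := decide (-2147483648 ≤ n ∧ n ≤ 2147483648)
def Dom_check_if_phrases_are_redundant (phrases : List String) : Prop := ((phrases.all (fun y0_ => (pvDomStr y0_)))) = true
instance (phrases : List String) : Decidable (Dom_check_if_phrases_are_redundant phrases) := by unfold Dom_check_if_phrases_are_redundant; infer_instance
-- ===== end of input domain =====

-- B replaces A's index-pair double loop by a count dictionary built once (duplicates decided by the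
-- count) plus one substring scan over the DISTINCT phrases only; objective: alternative (same worst
-- case, fewer scans on duplicate-heavy input).

-- ===== PORT A =====
def check_if_phrases_are_redundant (phrases : List String) : List String :=
  let phrases_list := phrases
  (PySem.List.pyRange 0 (phrases_list.length : Int) 1).foldl
    (fun new_phrases i =>
      let p1 := PySem.List.pyGetD phrases_list i ""
      let is_substring :=
        (PySem.List.pyRange 0 (phrases_list.length : Int) 1).any
          (fun j => decide (i ≠ j) && PySem.Str.isIn p1 (PySem.List.pyGetD phrases_list j ""))
      if is_substring then new_phrases else new_phrases ++ [p1])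
    []

-- ===== PORT B =====
def check_if_phrases_are_redundant_alt (phrases : List String) : List String :=
  let phrases_list := phrases
  let counts := phrases_list.foldl
    (fun d p => d.insert p (d.getD p 0 + 1)) (PySem.Dict.empty (κ := String) (ν := Int))
  let distinct := counts.keys
  phrases_list.filter (fun p =>
    (counts.getD p 0 == 1) &&
    !(distinct.any (fun q => decide (q ≠ p) && PySem.Str.isIn p q)))

-- ===== PRECONDITION & SPEC =====
def Spec_check_if_phrases_are_redundant (phrases : List String) (out : List String) : Prop := out = check_if_phrases_are_redundant_alt phrases
instance (phrases : List String) (out : List String) : Decidable (Spec_check_if_phrases_are_redundant phrases out) := by unfold Spec_check_if_phrases_are_redundant; infer_instance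

-- ===== CLAIM (what is proved, stated in full; the proofs are below) =====
def Claim_equal_check_if_phrases_are_redundant : Prop := ∀ (phrases : List String), Dom_check_if_phrases_are_redundant phrases → Spec_check_if_phrases_are_redundant phrases (check_if_phrases_are_redundant phrases)

-- ===== LEMMAS AND PROOFS =====

-- the value-only "keep" predicate both programs agree with: unique in the list, contained in no other string
def pvKeep (xs : List String) (p : String) : Bool :=
  (xs.count p == 1) && !(xs.any (fun q => decide (q ≠ p) && PySem.Str.isIn p q))

lemma alt_eq_filter (xs : List String) :
    check_if_phrases_are_redundant_alt xs = xs.filter (pvKeep xs) := by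
  unfold check_if_phrases_are_redundant_alt
  simp only [PySem.Dict.foldl_insert_getD_add_one_eq_counter, PySem.Dict.getD_counter,
    PySem.Dict.keys_counter]
  apply List.filter_congr
  intro p _
  simp only [pvKeep]
  congr 1
  · apply Bool.coe_iff_coe.mp; simp only [beq_iff_eq]; omega
  · congr 1
    apply Bool.coe_iff_coe.mp
    simp only [List.any_eq_true, PySem.Set.mem_ofList]

lemma foldl_enumerate_filter (c : Int → String → Bool) (P : String → Bool) :
    ∀ (xs : List String) (s : Int) (acc : List String),
    (∀ p ∈ PySem.List.enumerate xs s, c p.1 p.2 = !(P p.2)) →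
    (PySem.List.enumerate xs s).foldl
      (fun a q => if c q.1 q.2 then a else a ++ [q.2]) acc
      = acc ++ xs.filter P := by
  intro xs
  induction xs with
  | nil => intro s acc _; simp [PySem.List.enumerate_nil]
  | cons x t ih =>
    intro s acc h
    rw [PySem.List.enumerate_cons]
    simp only [List.foldl_cons, List.filter_cons]
    have hx : c s x = !(P x) := h (s, x) (by rw [PySem.List.enumerate_cons]; exact List.mem_cons_self)
    have ht : ∀ p ∈ PySem.List.enumerate t (s+1), c p.1 p.2 = !(P p.2) := by
      intro p hp; exact h p (by rw [PySem.List.enumerate_cons]; exact List.mem_cons_of_mem _ hp)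
    by_cases hP : P x
    · simp [hx, hP, ih (s+1) (acc ++ [x]) ht]
    · simp [hx, hP, ih (s+1) acc ht]

-- the combinatorial core: "some OTHER index's string contains xs[k]" is the value-only condition
-- "xs[k] occurs twice, or some DIFFERENT string of xs contains it"
lemma key_iff (xs : List String) (k : Nat) (hk : k < xs.length) :
    (∃ j : Nat, j < xs.length ∧ j ≠ k ∧ xs[k].toList <:+: (xs.getD j "").toList)
    ↔ ¬(xs.count xs[k] = 1 ∧ ¬∃ q ∈ xs, q ≠ xs[k] ∧ xs[k].toList <:+: q.toList) := by
  set v := xs[k] with hv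
  have hperm : xs.Perm (v :: xs.eraseIdx k) := (List.getElem_cons_eraseIdx_perm hk).symm
  have hcount : xs.count v = (xs.eraseIdx k).count v + 1 := by
    have := hperm.count_eq v
    simpa [List.count_cons] using this
  have hstep1 : (∃ j : Nat, j < xs.length ∧ j ≠ k ∧ v.toList <:+: (xs.getD j "").toList)
      ↔ ∃ q ∈ xs.eraseIdx k, v.toList <:+: q.toList := by
    constructor
    · rintro ⟨j, hj, hjk, hinf⟩
      exact ⟨xs[j], List.mem_eraseIdx_iff_getElem.mpr ⟨j, hj, hjk, rfl⟩,
        by rwa [List.getD_eq_getElem xs "" hj] at hinf⟩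
    · rintro ⟨q, hq, hinf⟩
      obtain ⟨j, hj, hjk, rfl⟩ := List.mem_eraseIdx_iff_getElem.mp hq
      exact ⟨j, hj, hjk, by rwa [List.getD_eq_getElem xs "" hj]⟩
  rw [hstep1]
  constructor
  · rintro ⟨q, hq, hinf⟩ ⟨hc1, hno⟩
    by_cases hqv : q = v
    · have : 1 ≤ (xs.eraseIdx k).count v := List.one_le_count_iff.mpr (hqv ▸ hq)
      omega
    · exact hno ⟨q, (xs.eraseIdx_sublist k).mem hq, hqv, hinf⟩
  · intro h
    rcases not_and_or.mp h with hc | hex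
    · have h2 : 2 ≤ xs.count v := by
        have h1 : 1 ≤ xs.count v := List.one_le_count_iff.mpr (List.getElem_mem hk)
        omega
      have : v ∈ xs.eraseIdx k := List.one_le_count_iff.mp (by omega)
      exact ⟨v, this, List.infix_refl _⟩
    · obtain ⟨q, hq, hqv, hinf⟩ := not_not.mp hex
      have : q ∈ v :: xs.eraseIdx k := hperm.mem_iff.mp hq
      rcases List.mem_cons.mp this with h1 | h1
      · exact absurd h1 hqv
      · exact ⟨q, h1, hinf⟩

lemma a_eq_filter (xs : List String) :
    check_if_phrases_are_redundant xs = xs.filter (pvKeep xs) := by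
  unfold check_if_phrases_are_redundant
  have h1 : (PySem.List.enumerate xs 0).foldl
        (fun (a : List String) (q : Int × String) =>
          if (PySem.List.pyRange 0 (xs.length : Int) 1).any
            (fun j => decide (q.1 ≠ j) && PySem.Str.isIn q.2 (PySem.List.pyGetD xs j "")) then a
          else a ++ [q.2]) []
      = (PySem.List.pyRange 0 (xs.length : Int) 1).foldl
        (fun new_phrases i =>
          let p1 := PySem.List.pyGetD xs i ""
          let is_substring :=
            (PySem.List.pyRange 0 (xs.length : Int) 1).any
              (fun j => decide (i ≠ j) && PySem.Str.isIn p1 (PySem.List.pyGetD xs j ""))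
          if is_substring then new_phrases else new_phrases ++ [p1])
        [] := by
    rw [PySem.List.enumerate_eq_map_pyRange xs "", List.foldl_map]
    rfl
  rw [← h1]
  refine (foldl_enumerate_filter
      (fun i p => (PySem.List.pyRange 0 (xs.length : Int) 1).any
        (fun j => decide (i ≠ j) && PySem.Str.isIn p (PySem.List.pyGetD xs j "")))
      (pvKeep xs) xs 0 [] ?_).trans (by simp)
  rintro ⟨i, p⟩ hp
  rw [PySem.List.mem_enumerate_iff] at hp
  obtain ⟨k, hk, hpe⟩ := hp
  rw [Prod.mk.injEq] at hpe
  obtain ⟨hi, hp2⟩ := hpe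
  subst hp2
  subst hi
  apply Bool.coe_iff_coe.mp
  simp only [List.any_eq_true, PySem.List.mem_pyRange_one, Bool.and_eq_true, decide_eq_true_eq,
    PySem.Str.isIn_iff_infix, pvKeep, Bool.not_and, Bool.or_eq_true, Bool.not_eq_eq_eq_not,
    Bool.not_true]
  simp only [zero_add]
  constructor
  · rintro ⟨x, ⟨hx0, hxlt⟩, hne, hinf⟩
    obtain ⟨j, rfl⟩ := Int.eq_ofNat_of_zero_le hx0
    rw [PySem.List.pyGetD_natCast] at hinf
    have hj : j < xs.length := by exact_mod_cast hxlt
    have hjk : j ≠ k := fun h => hne (by exact_mod_cast h.symm)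
    have hKey := (key_iff xs k hk).mp ⟨j, hj, hjk, hinf⟩
    rcases not_and_or.mp hKey with h | h
    · left; exact beq_eq_false_iff_ne.mpr h
    · right
      rw [Bool.not_false]
      simp only [List.any_eq_true, Bool.and_eq_true, decide_eq_true_eq,
        PySem.Str.isIn_iff_infix]
      exact not_not.mp h
  · intro h
    have hKey : ¬(xs.count xs[k] = 1 ∧ ¬∃ q ∈ xs, q ≠ xs[k] ∧ xs[k].toList <:+: q.toList) := by
      rcases h with h | h
      · exact fun hc => (beq_eq_false_iff_ne.mp h) hc.1
      · rw [Bool.not_false] at h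
        simp only [List.any_eq_true, Bool.and_eq_true, decide_eq_true_eq,
          PySem.Str.isIn_iff_infix] at h
        exact fun hc => hc.2 h
    obtain ⟨j, hj, hjk, hinf⟩ := (key_iff xs k hk).mpr hKey
    refine ⟨(j : Int), ⟨Int.natCast_nonneg j, by exact_mod_cast hj⟩,
      fun h' => hjk (by exact_mod_cast h'.symm), ?_⟩
    rw [PySem.List.pyGetD_natCast]
    exact hinf

-- ===== VERDICT (by name: the statement is the Claim_ definition above) =====
theorem check_if_phrases_are_redundant_spec : Claim_equal_check_if_phrases_are_redundant := by
  intro phrases _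
  unfold Spec_check_if_phrases_are_redundant
  rw [a_eq_filter, alt_eq_filter]
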